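-- pv_equiv track=rewrite | github.com/keegangood/advent_of_code_2021 | python/12-03/part2.py | get_digit_counts
-- ===== SOURCE A (Python) =====
-- def get_digit_counts(data):
--     output = []
--     # create list of 0s to count occurances of 1s in diag report
--     ones = [0 for i in data[0]]
--
--     row = 0
--     while row < len(data):
--         col = 0
--         while col < len(data[row]):
--             # increase the count for current 'col' position if a '1' exists
--             if data[row][col] == '1':
--                 ones[col] += 1
--
--             col += 1
--
--         row += 1
--
--         # the number of zeros is the length of the data
--         # less the number of ones
--         zeros = [len(data)-one for one in ones]
--
--     return (zeros, ones)
-- ===== SOURCE B (Python) =====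
-- def get_digit_counts(data):
--     ncols = len(data[0])
--     ones = [sum(1 for row in data if c < len(row) and row[c] == '1') for c in range(ncols)]
--     zeros = [len(data) - one for one in ones]
--     return (zeros, ones)
-- ===== Notes on version B (the rewrite author's own statement) =====
-- stated objective: simpler
-- what changed: Replaces A's row-outer while loops with mutable per-column counters (and zeros recomputed after every row) by a column-outer comprehension that counts ones per column in one pass and derives zeros once.
import Mathlib
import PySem

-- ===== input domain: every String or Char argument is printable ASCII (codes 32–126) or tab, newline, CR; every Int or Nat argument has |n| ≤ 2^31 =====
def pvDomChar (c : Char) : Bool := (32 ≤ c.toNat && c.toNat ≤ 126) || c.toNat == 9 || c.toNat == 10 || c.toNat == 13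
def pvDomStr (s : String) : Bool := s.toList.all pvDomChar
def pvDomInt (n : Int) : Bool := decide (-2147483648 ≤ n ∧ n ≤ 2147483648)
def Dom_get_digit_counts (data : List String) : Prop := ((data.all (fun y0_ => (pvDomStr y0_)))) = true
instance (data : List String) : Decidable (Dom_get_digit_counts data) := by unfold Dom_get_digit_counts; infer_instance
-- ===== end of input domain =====

-- B is a column-outer re-decomposition of A's row-outer counting; equivalence is claimed on inputs where A returns.

-- ===== PORT A =====
-- ones[col] += 1 : in-range increment (Python raises out of range; excluded by Pre_)
def pvIncAt : List Int → Nat → List Int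
  | [], _ => []
  | o :: os, 0 => (o + 1) :: os
  | o :: os, n + 1 => o :: pvIncAt os n

-- inner while: col over the characters of the current row
def pvRowA (ones : List Int) (cs : List Char) (col : Nat) : List Int :=
  match cs with
  | [] => ones
  | c :: cs' => pvRowA (if c = '1' then pvIncAt ones col else ones) cs' (col + 1)

-- outer while: row over data; zeros recomputed after each row as in A
def pvLoopA (dlen : Int) (rows : List String) (ones zeros : List Int) : List Int × List Int :=
  match rows with
  | [] => (zeros, ones)
  | r :: rs =>
      let ones' := pvRowA ones r.toList 0
      pvLoopA dlen rs ones' (ones'.map (fun one => dlen - one))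

def get_digit_counts (data : List String) : List Int × List Int :=
  let first := (PySem.List.pyGet? data 0).getD ""   -- data[0]; none (IndexError) excluded by Pre_
  let ones := first.toList.map (fun _ => (0 : Int))
  pvLoopA (data.length : Int) data ones []

-- ===== PORT B =====
def get_digit_counts_alt (data : List String) : List Int × List Int :=
  let ncols := ((PySem.List.pyGet? data 0).getD "").toList.length   -- len(data[0])
  let ones := (List.range ncols).map (fun c =>
      data.foldl (fun acc row =>
        if c < row.toList.length ∧ row.toList.getD c ' ' = '1' then acc + 1 else acc) (0 : Int))
  let zeros := ones.map (fun one => (data.length : Int) - one)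
  (zeros, ones)

-- ===== PRECONDITION & SPEC =====
-- Pre_ excludes exactly the inputs where Python A raises IndexError: empty data (data[0]),
-- and a '1' in some row at a column index ≥ len(data[0]) (ones[col] += 1 out of range).
def Pre_get_digit_counts (data : List String) : Prop :=
  data ≠ [] ∧ ∀ r ∈ data, '1' ∉ r.toList.drop ((data.headD "").toList.length)
instance (data : List String) : Decidable (Pre_get_digit_counts data) := by
  unfold Pre_get_digit_counts; infer_instance
def pvWitness_get_digit_counts : List String := ["101", "011", "110"]

def Spec_get_digit_counts (data : List String) (out : List Int × List Int) : Prop := out = get_digit_counts_alt data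
instance (data : List String) (out : List Int × List Int) : Decidable (Spec_get_digit_counts data out) := by unfold Spec_get_digit_counts; infer_instance

-- ===== CLAIM (what is proved, stated in full; the proofs are below) =====
def Claim_equal_get_digit_counts : Prop := ∀ (data : List String), Dom_get_digit_counts data → Pre_get_digit_counts data → Spec_get_digit_counts data (get_digit_counts data)

-- ===== LEMMAS AND PROOFS =====

-- test: row contributes a '1' in column i
def pvHasOne (i : Nat) (row : String) : Bool :=
  decide (i < row.toList.length ∧ row.toList.getD i ' ' = '1')

theorem pvIncAt_length (ones : List Int) (n : Nat) : (pvIncAt ones n).length = ones.length := by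
  induction ones generalizing n with
  | nil => rfl
  | cons o os ih => cases n with
    | zero => rfl
    | succ m => simp [pvIncAt, ih]

theorem pvIncAt_getD (ones : List Int) (n i : Nat) :
    (pvIncAt ones n).getD i 0 =
      ones.getD i 0 + (if i = n ∧ n < ones.length then 1 else 0) := by
  induction ones generalizing n i with
  | nil => simp [pvIncAt]
  | cons o os ih =>
    cases n with
    | zero =>
      cases i with
      | zero => simp [pvIncAt]
      | succ j => simp [pvIncAt]
    | succ m =>
      cases i with
      | zero => simp [pvIncAt]
      | succ j => simpa [pvIncAt, Nat.succ_lt_succ_iff] using ih m j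

theorem pvRowA_length (cs : List Char) (ones : List Int) (col : Nat) :
    (pvRowA ones cs col).length = ones.length := by
  induction cs generalizing ones col with
  | nil => rfl
  | cons c cs ih =>
    simp only [pvRowA]
    rw [ih]
    split <;> simp [pvIncAt_length]

theorem pvRowA_getD (cs : List Char) (ones : List Int) (col i : Nat) :
    (pvRowA ones cs col).getD i 0 =
      ones.getD i 0 +
        (if i < ones.length ∧ col ≤ i ∧ i - col < cs.length ∧ cs.getD (i - col) ' ' = '1'
          then 1 else 0) := by
  induction cs generalizing ones col with
  | nil => simp [pvRowA]
  | cons c cs ih =>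
    simp only [pvRowA]
    rw [ih]
    have hlen : (if c = '1' then pvIncAt ones col else ones).length = ones.length := by
      split <;> simp [pvIncAt_length]
    have hget : (if c = '1' then pvIncAt ones col else ones).getD i 0 =
        ones.getD i 0 + (if c = '1' ∧ i = col ∧ col < ones.length then 1 else 0) := by
      split <;> rename_i hc
      · rw [pvIncAt_getD]; simp [hc]
      · simp [hc]
    rw [hlen, hget]
    by_cases hic : i = col
    · subst hic
      have h0 : i - i = 0 := by omega
      simp only [h0, List.getD_cons_zero, List.length_cons]
      have hcond : ¬ (i < ones.length ∧ i + 1 ≤ i ∧ i - (i + 1) < cs.length ∧ cs.getD (i - (i + 1)) ' ' = '1') := by omega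
      rw [if_neg hcond]
      by_cases hl : i < ones.length
      · by_cases hc : c = '1'
        · simp [hc, hl]
        · simp [hc, hl]
      · simp [hl]
    · have hne : ¬ (c = '1' ∧ i = col ∧ col < ones.length) := by tauto
      rw [if_neg hne, add_zero]
      by_cases hlt : col < i
      · have hsub : i - col = (i - (col + 1)) + 1 := by omega
        rw [hsub]
        simp only [List.getD_cons_succ, List.length_cons]
        have ha : col ≤ i := by omega
        have hb : col + 1 ≤ i := by omega
        simp [ha, hb]
      · have h1 : ¬ col ≤ i := by omega
        have h2 : ¬ (col + 1 ≤ i) := by omega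
        simp [h1, h2]

-- the row-outer fold A performs over the whole matrix
def pvFoldA (rows : List String) (ones : List Int) : List Int :=
  rows.foldl (fun o r => pvRowA o r.toList 0) ones

theorem pvFoldA_length (rows : List String) (ones : List Int) :
    (pvFoldA rows ones).length = ones.length := by
  induction rows generalizing ones with
  | nil => rfl
  | cons r rs ih => simp [pvFoldA, List.foldl_cons] at *; rw [ih, pvRowA_length]

theorem pvFoldA_getD (rows : List String) (ones : List Int) (i : Nat) (hi : i < ones.length) :
    (pvFoldA rows ones).getD i 0 = ones.getD i 0 + (rows.countP (pvHasOne i) : Int) := by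
  induction rows generalizing ones with
  | nil => simp [pvFoldA]
  | cons r rs ih =>
    have h1 : pvFoldA (r :: rs) ones = pvFoldA rs (pvRowA ones r.toList 0) := rfl
    rw [h1, ih _ (by rw [pvRowA_length]; exact hi), pvRowA_getD]
    rw [List.countP_cons]
    have h0 : i - 0 = i := rfl
    rw [h0]
    have hiff : (i < ones.length ∧ 0 ≤ i ∧ i < r.toList.length ∧ r.toList.getD i ' ' = '1')
        ↔ pvHasOne i r = true := by
      unfold pvHasOne
      constructor
      · rintro ⟨_, _, h3, h4⟩; exact decide_eq_true ⟨h3, h4⟩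
      · intro h; simp only [decide_eq_true_eq] at h; exact ⟨hi, Nat.zero_le i, h.1, h.2⟩
    rw [if_congr hiff rfl rfl]
    by_cases hp : pvHasOne i r = true <;> simp [hp] <;> ring

theorem pvLoopA_eq (dlen : Int) (rows : List String) (ones zeros : List Int) (h : rows ≠ []) :
    pvLoopA dlen rows ones zeros =
      ((pvFoldA rows ones).map (fun one => dlen - one), pvFoldA rows ones) := by
  induction rows generalizing ones zeros with
  | nil => exact absurd rfl h
  | cons r rs ih =>
    simp only [pvLoopA]
    rcases rs with _ | ⟨r2, rs'⟩
    · rfl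
    · exact ih _ _ (by simp)

theorem pvOnes_eq (data : List String) (h : data ≠ []) :
    pvFoldA data (((PySem.List.pyGet? data 0).getD "").toList.map (fun _ => (0 : Int))) =
      (List.range ((PySem.List.pyGet? data 0).getD "").toList.length).map (fun c =>
        data.foldl (fun acc row =>
          if c < row.toList.length ∧ row.toList.getD c ' ' = '1' then acc + 1 else acc) (0 : Int)) := by
  set first := (PySem.List.pyGet? data 0).getD "" with hf
  set ones0 : List Int := first.toList.map (fun _ => (0 : Int)) with ho
  have hlen0 : ones0.length = first.toList.length := by simp [ho]
  apply List.ext_getElem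
  · rw [pvFoldA_length, hlen0]; simp
  · intro i h1 h2
    have hi : i < ones0.length := by rw [pvFoldA_length] at h1; exact h1
    have hg : (pvFoldA data ones0)[i] = (pvFoldA data ones0).getD i 0 :=
      (List.getD_eq_getElem _ _ h1).symm
    rw [hg, pvFoldA_getD data ones0 i hi]
    have h0 : ones0.getD i 0 = 0 := by
      rw [List.getD_eq_getElem _ _ hi]; simp [ho]
    rw [h0, zero_add]
    have hr : i < (List.range first.toList.length).length := by simpa using h2
    rw [List.getElem_map, List.getElem_range]
    rw [PySem.List.foldl_ite_add_one, zero_add]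
    rfl

-- ===== VERDICT (by name: the statement is the Claim_ definition above) =====
theorem get_digit_counts_spec : Claim_equal_get_digit_counts := by
  intro data _ hpre
  unfold Spec_get_digit_counts get_digit_counts get_digit_counts_alt
  rw [pvLoopA_eq _ _ _ _ hpre.1]
  rw [pvOnes_eq data hpre.1]
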